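-- pv_equiv track=rewrite | github.com/Alvaropz/Python_problems_BinarySearch | 1. Easy/longest_consecutive_duplicate_string/longest_consecutive_duplicate_string.py | longest_consecutive_duplicate_string
-- ===== SOURCE A (Python) =====
-- def longest_consecutive_duplicate_string(s):
--     if len(s) != 0:
--         count = 0
--         for index, element in enumerate(s):
--             next_index = index + 1
--             temp_count = 1
--             if index != len(s)-1:
--                 while element == s[next_index]:
--                     temp_count += 1
--                     if count < temp_count:
--                         count = temp_count
--                     next_index += 1
--                     if next_index == len(s):
--                         break
--         return count
--     else:
--         return 0
-- ===== SOURCE B (Python) =====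
-- def longest_consecutive_duplicate_string(s):
--     best = 0
--     run = 0
--     prev = None
--     for ch in s:
--         run = run + 1 if ch == prev else 1
--         if run > best:
--             best = run
--         prev = ch
--     return best if best >= 2 else 0
-- ===== Notes on version B (the rewrite author's own statement) =====
-- stated objective: faster
-- what changed: Replaced the nested rescans (an inner while extending the run from every index) by a single pass that keeps the current run length and the best run, returning best if it is at least 2 else 0.
import Mathlib
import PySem

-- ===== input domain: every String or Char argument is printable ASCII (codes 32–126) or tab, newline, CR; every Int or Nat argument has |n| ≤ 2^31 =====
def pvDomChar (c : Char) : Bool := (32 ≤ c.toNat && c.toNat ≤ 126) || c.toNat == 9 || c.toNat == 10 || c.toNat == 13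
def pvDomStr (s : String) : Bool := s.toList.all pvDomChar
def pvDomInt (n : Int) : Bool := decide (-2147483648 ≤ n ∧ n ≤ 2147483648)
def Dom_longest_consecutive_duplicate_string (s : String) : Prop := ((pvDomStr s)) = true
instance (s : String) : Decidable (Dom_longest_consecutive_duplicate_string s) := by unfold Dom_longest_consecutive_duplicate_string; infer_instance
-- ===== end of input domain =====

-- B replaces A's nested per-index rescans by one linear pass tracking the current and best run (objective: faster).


-- ===== PORT A =====
-- the inner `while element == s[next_index]:` loop of A; `s[next_index]` is evaluated first, so the
-- bounds test comes first (out of range would be Python's IndexError — unreachable in A, since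
-- next_index starts at index+1 < len and the `break` stops at len); next_index ≥ 1 always, so Nat is exact.
def pvInnerA (l : List Char) (element : Char) (next_index : Nat) (temp_count count : Int) : Int :=
  if hlt : next_index < l.length then
    if element == l[next_index] then
      let temp_count := temp_count + 1
      let count := if count < temp_count then temp_count else count
      let next_index := next_index + 1
      if next_index == l.length then count
      else pvInnerA l element next_index temp_count count
    else count
  else count      -- unreachable (IndexError in Python)
termination_by l.length - next_index

def longest_consecutive_duplicate_string (s : String) : Int :=
  let l := s.toList
  if l.length ≠ 0 then
    (PySem.List.enumerate l 0).foldl (fun count ic =>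
      -- ic.1 is the Int index from enumerate; it is ≥ 0, so .toNat is exact here
      if ic.1 ≠ (l.length : Int) - 1 then pvInnerA l ic.2 (ic.1 + 1).toNat 1 count
      else count) 0
  else 0

-- ===== PORT B =====
def pvGoB (l : List Char) (prev : Option Char) (run best : Int) : Int :=
  match l with
  | [] => if best ≥ 2 then best else 0
  | ch :: rest =>
    let run := if some ch == prev then run + 1 else 1
    let best := if run > best then run else best
    pvGoB rest (some ch) run best

def longest_consecutive_duplicate_string_alt (s : String) : Int :=
  pvGoB s.toList none 0 0

-- ===== PRECONDITION & SPEC =====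
def Spec_longest_consecutive_duplicate_string (s : String) (out : Int) : Prop := out = longest_consecutive_duplicate_string_alt s
instance (s : String) (out : Int) : Decidable (Spec_longest_consecutive_duplicate_string s out) := by unfold Spec_longest_consecutive_duplicate_string; infer_instance

-- ===== CLAIM (what is proved, stated in full; the proofs are below) =====
def Claim_equal_longest_consecutive_duplicate_string : Prop := ∀ (s : String), Dom_longest_consecutive_duplicate_string s → Spec_longest_consecutive_duplicate_string s (longest_consecutive_duplicate_string s)

-- ===== LEMMAS AND PROOFS =====

-- number of leading characters of l equal to c
def pvLead (c : Char) : List Char → Nat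
  | [] => 0
  | x :: xs => if x = c then pvLead c xs + 1 else 0

-- max over all positions i of (1 + length of the equal-run starting just after i)
def pvR : List Char → Int
  | [] => 0
  | c :: rest => max (1 + (pvLead c rest : Int)) (pvR rest)

-- A's accumulator contribution per position: 0 for a run of length 1, else the run length
def pvDupMax : List Char → Int
  | [] => 0
  | c :: rest => max (if pvLead c rest = 0 then 0 else 1 + (pvLead c rest : Int)) (pvDupMax rest)

-- B's running-max recursion, accumulator-free
def pvMRuns (prev : Option Char) (run : Int) : List Char → Int
  | [] => run
  | ch :: rest =>
    let run1 := if some ch == prev then run + 1 else 1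
    max run1 (pvMRuns (some ch) run1 rest)

-- B's final `best if best >= 2 else 0`
def pvFin (m : Int) : Int := if m ≥ 2 then m else 0

theorem pvFin_of_ge {m : Int} (h : 2 ≤ m) : pvFin m = m := if_pos h

theorem pvFin_of_lt {m : Int} (h : m < 2) : pvFin m = 0 := if_neg (by omega)

theorem pvR_nonneg (l : List Char) : 0 ≤ pvR l := by
  induction l with
  | nil => simp [pvR]
  | cons c rest ih => simp only [pvR, le_max_iff]; right; exact ih

theorem pvDupMax_nonneg (l : List Char) : 0 ≤ pvDupMax l := by
  induction l with
  | nil => simp [pvDupMax]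
  | cons c rest ih => simp only [pvDupMax, le_max_iff]; right; exact ih

theorem pvInnerA_eq (l : List Char) (e : Char) :
    ∀ (t : List Char) (j : Nat) (tc cnt : Int), l.drop j = t →
    pvInnerA l e j tc cnt =
      if pvLead e t = 0 then cnt else max cnt (tc + (pvLead e t : Int)) := by
  intro t
  induction t with
  | nil =>
    intro j tc cnt h
    have hj : l.length ≤ j := by
      have hlen : (l.drop j).length = l.length - j := List.length_drop
      rw [h] at hlen; simp at hlen; omega
    rw [pvInnerA.eq_def, dif_neg (by omega)]
    simp [pvLead]
  | cons c rest ih =>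
    intro j tc cnt h
    have hjlt : j < l.length := by
      have hlen : (l.drop j).length = l.length - j := List.length_drop
      rw [h] at hlen; simp at hlen; omega
    have hgt : l[j] = c := by
      have h0 : (l.drop j)[0]'(by rw [h]; simp) = l[j]'hjlt := by
        rw [List.getElem_drop]
        simp
      rw [← h0]; simp [h]
    have hrest : l.drop (j + 1) = rest := by
      have ht : (l.drop j).tail = l.drop (j + 1) := by
        rw [← List.drop_drop]; simp
      rw [← ht, h]; rfl
    rw [pvInnerA.eq_def, dif_pos hjlt, hgt]
    by_cases hec : e = c
    · subst hec
      simp only [beq_self_eq_true, if_true]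
      by_cases hend : j + 1 = l.length
      · have hre : rest = [] := by
          rw [← hrest]; apply List.drop_eq_nil_of_le; omega
        subst hre
        rw [if_pos (by simpa using hend)]
        simp only [pvLead]
        push_cast
        split_ifs <;> omega
      · rw [if_neg (by simpa using hend)]
        rw [ih (j + 1) (tc + 1) (if cnt < tc + 1 then tc + 1 else cnt) hrest]
        simp only [pvLead]
        push_cast
        split_ifs <;> omega
    · rw [if_neg (by simpa using hec)]
      have hce : c ≠ e := fun hh => hec hh.symm
      simp [pvLead, hce]

theorem pvOuter_eq (l : List Char) :
    ∀ (t : List Char) (j : Nat) (cnt : Int), l.drop j = t → 0 ≤ cnt →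
    (PySem.List.enumerate t (j : Int)).foldl (fun count ic =>
      if ic.1 ≠ (l.length : Int) - 1 then pvInnerA l ic.2 (ic.1 + 1).toNat 1 count
      else count) cnt = max cnt (pvDupMax t) := by
  intro t
  induction t with
  | nil =>
    intro j cnt _ hc
    rw [PySem.List.enumerate_nil]
    simp only [List.foldl_nil, pvDupMax]
    omega
  | cons c rest ih =>
    intro j cnt h hc
    have hjlt : j < l.length := by
      have hlen : (l.drop j).length = l.length - j := List.length_drop
      rw [h] at hlen; simp at hlen; omega
    have hrest : l.drop (j + 1) = rest := by
      have ht : (l.drop j).tail = l.drop (j + 1) := by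
        rw [← List.drop_drop]; simp
      rw [← ht, h]; rfl
    rw [PySem.List.enumerate_cons, List.foldl_cons]
    have hstep : (if ((j : Int)) ≠ (l.length : Int) - 1 then pvInnerA l c (((j : Int)) + 1).toNat 1 cnt else cnt)
        = max cnt (if pvLead c rest = 0 then 0 else 1 + (pvLead c rest : Int)) := by
      by_cases hlast : j = l.length - 1
      · have hre : rest = [] := by
          rw [← hrest]; apply List.drop_eq_nil_of_le; omega
        subst hre
        rw [if_neg (by omega)]
        simp only [pvLead]
        split_ifs <;> omega
      · rw [if_pos (by omega)]
        have hto : (((j : Int)) + 1).toNat = j + 1 := by omega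
        rw [hto, pvInnerA_eq l c rest (j + 1) 1 cnt hrest]
        by_cases hl0 : pvLead c rest = 0
        · rw [if_pos hl0, if_pos hl0]
          omega
        · rw [if_neg hl0, if_neg hl0]
    rw [hstep]
    have hcast : ((j : Int)) + 1 = (((j + 1 : Nat)) : Int) := by push_cast; ring
    rw [hcast, ih (j + 1) _ hrest (by positivity)]
    simp only [pvDupMax]
    omega

theorem pvA_eq (s : String) : longest_consecutive_duplicate_string s = pvDupMax s.toList := by
  unfold longest_consecutive_duplicate_string
  by_cases h : s.toList.length = 0
  · have h0 : s.toList = [] := List.eq_nil_of_length_eq_zero h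
    simp [h0, pvDupMax]
  · simp only [h, ne_eq, not_false_eq_true, if_true]
    have hout := pvOuter_eq s.toList s.toList 0 0 (by simp) (le_refl 0)
    simp only [Nat.cast_zero] at hout
    rw [hout]
    have := pvDupMax_nonneg s.toList
    omega

-- dropping the positions inside the leading run does not change the max of run lengths
theorem pvR_cons_skip (l : List Char) : ∀ c, pvR (c :: l) = max (1 + (pvLead c l : Int)) (pvR (l.drop (pvLead c l))) := by
  induction l with
  | nil => intro c; simp [pvR, pvLead]
  | cons d t ih =>
    intro c
    by_cases hdc : d = c
    · subst hdc
      have h1 : pvLead d (d :: t) = pvLead d t + 1 := by simp [pvLead]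
      rw [pvR, h1]
      have h2 : pvR (d :: t) = max (1 + (pvLead d t : Int)) (pvR (t.drop (pvLead d t))) := ih d
      rw [h2]
      have h3 : (d :: t).drop (pvLead d t + 1) = t.drop (pvLead d t) := by simp
      rw [h3]
      push_cast
      omega
    · have h1 : pvLead c (d :: t) = 0 := by simp [pvLead, hdc]
      rw [h1]
      rw [pvR, h1]
      simp
theorem pvDupMax_eq_fin_R (l : List Char) : pvDupMax l = pvFin (pvR l) := by
  induction l with
  | nil => simp [pvDupMax, pvR, pvFin]
  | cons c rest ih =>
    rw [pvDupMax, pvR, ih]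
    have hR := pvR_nonneg rest
    by_cases hl0 : pvLead c rest = 0
    · rw [if_pos hl0, hl0]
      push_cast
      by_cases h2 : 2 ≤ pvR rest
      · rw [pvFin_of_ge h2, pvFin_of_ge (le_trans h2 (le_max_right _ _))]
        omega
      · rw [pvFin_of_lt (by omega), pvFin_of_lt (by omega)]
        omega
    · rw [if_neg hl0]
      have hge : 1 ≤ (pvLead c rest : Int) := by exact_mod_cast Nat.one_le_iff_ne_zero.mpr hl0
      have hmx : (2 : Int) ≤ max (1 + (pvLead c rest : Int)) (pvR rest) := by omega
      rw [pvFin_of_ge hmx]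
      by_cases h2 : 2 ≤ pvR rest
      · rw [pvFin_of_ge h2]
      · rw [pvFin_of_lt (by omega)]
        omega

-- B's recursion under a running best that dominates run: the old run can be split off
theorem pvMRuns_some (l : List Char) : ∀ (p : Char) (run best : Int), 0 ≤ run → run ≤ best →
    max best (pvMRuns (some p) run l) =
    max best (max (run + (pvLead p l : Int)) (pvMRuns none 0 (l.drop (pvLead p l)))) := by
  induction l with
  | nil =>
    intro p run best h0 hb
    simp only [pvMRuns, pvLead, List.drop_nil]
    push_cast
    omega
  | cons c rest ih =>
    intro p run best h0 hb
    by_cases hcp : c = p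
    · subst hcp
      have h1 : pvLead c (c :: rest) = pvLead c rest + 1 := by simp [pvLead]
      rw [pvMRuns, h1]
      simp only [beq_self_eq_true, if_true]
      have h2 : (c :: rest).drop (pvLead c rest + 1) = rest.drop (pvLead c rest) := by simp
      rw [h2]
      have hih := ih c (run + 1) (max best (run + 1)) (by omega) (by omega)
      push_cast at hih ⊢
      omega
    · have h1 : pvLead p (c :: rest) = 0 := by simp [pvLead, hcp]
      rw [h1]
      have hne : (some c == some p) = false := by simp [hcp]
      simp only [pvMRuns, hne, Bool.false_eq_true, if_false, List.drop_zero]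
      have hne2 : (some c == (none : Option Char)) = false := by rfl
      simp only [hne2, Bool.false_eq_true, if_false]
      push_cast
      omega

theorem pvT_eq_R_aux : ∀ (n : Nat) (l : List Char), l.length ≤ n → pvMRuns none 0 l = pvR l := by
  intro n
  induction n with
  | zero =>
    intro l h
    have h0 : l = [] := List.eq_nil_of_length_eq_zero (by omega)
    subst h0
    simp [pvMRuns, pvR]
  | succ n ih =>
    intro l h
    match l with
    | [] => simp [pvMRuns, pvR]
    | c :: rest =>
      have hne2 : ((some c : Option Char) == none) = false := by rfl
      rw [pvMRuns]
      simp only [hne2, Bool.false_eq_true, if_false]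
      have h1 := pvMRuns_some rest c 1 1 (by omega) (le_refl 1)
      have h2 : pvMRuns none 0 (rest.drop (pvLead c rest)) = pvR (rest.drop (pvLead c rest)) := by
        apply ih
        have hd : (rest.drop (pvLead c rest)).length = rest.length - pvLead c rest := List.length_drop
        simp at h
        omega
      rw [h2] at h1
      rw [pvR_cons_skip rest c] at *
      have := pvR_nonneg (rest.drop (pvLead c rest))
      omega

theorem pvT_eq_R (l : List Char) : pvMRuns none 0 l = pvR l :=
  pvT_eq_R_aux l.length l (le_refl _)

theorem pvGoB_eq (l : List Char) : ∀ (prev : Option Char) (run best : Int), 0 ≤ run → run ≤ best →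
    pvGoB l prev run best = pvFin (max best (pvMRuns prev run l)) := by
  induction l with
  | nil =>
    intro prev run best h0 hb
    simp only [pvGoB, pvMRuns, pvFin]
    have hm : max best run = best := by omega
    rw [hm]
  | cons c rest ih =>
    intro prev run best h0 hb
    rw [pvGoB, pvMRuns]
    set run1 := if some c == prev then run + 1 else 1 with hrun1
    have h01 : 0 ≤ run1 := by rw [hrun1]; split <;> omega
    have hbest1 : (if run1 > best then run1 else best) = max best run1 := by
      split <;> omega
    rw [hbest1, ih (some c) run1 (max best run1) h01 (le_max_right _ _)]
    have hmm : max (max best run1) (pvMRuns (some c) run1 rest) = max best (max run1 (pvMRuns (some c) run1 rest)) := by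
      omega
    rw [hmm]

theorem pvB_eq (s : String) : longest_consecutive_duplicate_string_alt s = pvFin (pvR s.toList) := by
  unfold longest_consecutive_duplicate_string_alt
  rw [pvGoB_eq s.toList none 0 0 (le_refl 0) (le_refl 0), pvT_eq_R]
  have h0 := pvR_nonneg s.toList
  have hm : max 0 (pvR s.toList) = pvR s.toList := by omega
  rw [hm]

-- ===== VERDICT (by name: the statement is the Claim_ definition above) =====
theorem longest_consecutive_duplicate_string_spec : Claim_equal_longest_consecutive_duplicate_string := by
  intro s _
  unfold Spec_longest_consecutive_duplicate_string
  rw [pvA_eq, pvB_eq, pvDupMax_eq_fin_R]
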